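-- pv_equiv track=rewrite | github.com/SilvestreBartolomeu/Aulas-Python | exercicio4.py | agrupar_elementos
-- ===== SOURCE A (Python) =====
-- def agrupar_elementos(quantidade, Lista):
--     nova_lista = list()
--     for i in range(0, len(Lista), quantidade):
--       soma = 0
--       for j in range(0, quantidade):
--         if i+j < len(Lista):
--           soma += Lista[i+j]
--       nova_lista.append(soma)
--     return nova_lista
-- ===== SOURCE B (Python) =====
-- def agrupar_elementos(quantidade, Lista):
--     pref = [0]
--     for x in Lista:
--         pref.append(pref[-1] + x)
--     nova_lista = []
--     for i in range(0, len(Lista), quantidade):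
--         nova_lista.append(pref[min(i + quantidade, len(Lista))] - pref[i])
--     return nova_lista
-- ===== Notes on version B (the rewrite author's own statement) =====
-- stated objective: alternative
-- what changed: Replaces the nested per-chunk summing loop with a prefix-sum array built once, so each chunk sum is a single subtraction pref[min(i+q,n)]-pref[i].
import Mathlib
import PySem

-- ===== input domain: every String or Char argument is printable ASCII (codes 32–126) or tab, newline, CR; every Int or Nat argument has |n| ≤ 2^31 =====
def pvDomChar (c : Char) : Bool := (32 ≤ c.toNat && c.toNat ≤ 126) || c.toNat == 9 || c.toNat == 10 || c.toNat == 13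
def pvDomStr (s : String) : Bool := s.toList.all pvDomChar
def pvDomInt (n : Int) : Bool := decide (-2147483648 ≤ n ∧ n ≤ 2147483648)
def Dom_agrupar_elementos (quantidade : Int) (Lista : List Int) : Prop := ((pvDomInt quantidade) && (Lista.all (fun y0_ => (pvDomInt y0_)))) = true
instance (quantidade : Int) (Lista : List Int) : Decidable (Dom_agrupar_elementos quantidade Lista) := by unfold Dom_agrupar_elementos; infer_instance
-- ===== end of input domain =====

-- B replaces A's nested per-chunk summing loop by a prefix-sum array built once,
-- each chunk sum becoming a single subtraction (alternative decomposition, same O(n) cost).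

-- ===== PORT A =====
def agrupar_elementos (quantidade : Int) (Lista : List Int) : List Int :=
  (PySem.List.pyRange 0 (Lista.length : Int) quantidade).foldl
    (fun nova i => nova ++ [(PySem.List.pyRange 0 quantidade 1).foldl
        (fun soma j => if i + j < (Lista.length : Int) then soma + PySem.List.pyGetD Lista (i + j) 0 else soma) 0]) []

-- ===== PORT B =====
def agrupar_elementos_alt (quantidade : Int) (Lista : List Int) : List Int :=
  let pref := Lista.foldl (fun p x => p ++ [PySem.List.pyGetD p (-1) 0 + x]) [0]
  (PySem.List.pyRange 0 (Lista.length : Int) quantidade).foldl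
    (fun nova i => nova ++ [PySem.List.pyGetD pref (min (i + quantidade) (Lista.length : Int)) 0
                            - PySem.List.pyGetD pref i 0]) []

-- ===== PRECONDITION & SPEC =====
-- Pre_ excludes only quantidade = 0, where Python's range(0, len, 0) raises ValueError (in both A and B).
def Pre_agrupar_elementos (quantidade : Int) (Lista : List Int) : Prop := quantidade ≠ 0
instance (quantidade : Int) (Lista : List Int) : Decidable (Pre_agrupar_elementos quantidade Lista) := by unfold Pre_agrupar_elementos; infer_instance
def pvWitness_agrupar_elementos : Int × List Int := (2, [1, 2, 3])

def Spec_agrupar_elementos (quantidade : Int) (Lista : List Int) (out : List Int) : Prop := out = agrupar_elementos_alt quantidade Lista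
instance (quantidade : Int) (Lista : List Int) (out : List Int) : Decidable (Spec_agrupar_elementos quantidade Lista out) := by unfold Spec_agrupar_elementos; infer_instance

-- ===== CLAIM (what is proved, stated in full; the proofs are below) =====
def Claim_equal_agrupar_elementos : Prop := ∀ (quantidade : Int) (Lista : List Int), Dom_agrupar_elementos quantidade Lista → Pre_agrupar_elementos quantidade Lista → Spec_agrupar_elementos quantidade Lista (agrupar_elementos quantidade Lista)

-- ===== LEMMAS AND PROOFS =====

/-- Running prefix sums: `psums s L = [s + L[0], s + L[0] + L[1], …]`. -/
def psums (s : Int) : List Int → List Int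
  | [] => []
  | x :: xs => (s + x) :: psums (s + x) xs

theorem psums_length (s : Int) (L : List Int) : (psums s L).length = L.length := by
  induction L generalizing s with
  | nil => rfl
  | cons x xs ih => simp [psums, ih]

theorem pref_fold (L : List Int) : ∀ (p : List Int) (s : Int),
    L.foldl (fun p x => p ++ [PySem.List.pyGetD p (-1) 0 + x]) (p ++ [s]) = p ++ s :: psums s L := by
  induction L with
  | nil => intro p s; simp [psums]
  | cons x xs ih =>
    intro p s
    simp only [List.foldl_cons, PySem.List.pyGetD_neg_one_append_singleton]
    have h := ih (p ++ [s]) (s + x)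
    simpa [psums] using h

theorem psums_get (L : List Int) : ∀ (s : Int) (k : Nat), k ≤ L.length →
    (s :: psums s L).getD k 0 = s + (L.take k).sum := by
  induction L with
  | nil => intro s k hk; simp only [List.length_nil, Nat.le_zero] at hk; subst hk; simp
  | cons x xs ih =>
    intro s k hk
    cases k with
    | zero => simp
    | succ k =>
      have h := ih (s + x) k (by simpa using hk)
      simp only [psums, List.getD_cons_succ] at h ⊢
      rw [h]
      simp [add_assoc]

theorem seg_sum (L : List Int) (s : Nat) : ∀ (t : Nat), s + t ≤ L.length →
    ((List.range t).map (fun (k : Nat) => PySem.List.pyGetD L ((s : Int) + (k : Int)) 0)).sum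
      = ((L.drop s).take t).sum := by
  intro t
  induction t with
  | zero => simp
  | succ t ih =>
    intro h
    have ht : s + t < L.length := by omega
    rw [List.range_succ, List.map_append, List.sum_append]
    rw [ih (by omega)]
    have hlast : PySem.List.pyGetD L ((s : Int) + (t : Int)) 0 = L[s + t] := by
      rw [PySem.List.pyGetD_eq_getElem L 0 (by positivity) (by exact_mod_cast ht)]
      simp only [show ((s : Int) + (t : Int)).toNat = s + t from by omega]
    have hd : t < (L.drop s).length := by simp; omega
    have : (L.drop s).take (t + 1) = (L.drop s).take t ++ [(L.drop s)[t]] := by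
      rw [List.take_add_one]
      simp [List.getElem?_eq_getElem hd]
    rw [this, List.sum_append]
    simp [hlast, List.getElem_drop]

theorem take_diff (L : List Int) (s t : Nat) :
    (L.take (s + t)).sum - (L.take s).sum = ((L.drop s).take t).sum := by
  rw [List.take_add, List.sum_append]
  ring

theorem pyRange_neg_step_nil (b s : Int) (hs : s < 0) (hb : 0 ≤ b) :
    PySem.List.pyRange 0 b s = [] := by
  simp only [PySem.List.pyRange]
  rw [if_neg (by omega), if_neg (by omega), if_neg (by omega)]
  simp

theorem elem_eq (quantidade : Int) (L : List Int) (hq : 0 < quantidade) (i : Int)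
    (h0 : 0 ≤ i) (h1 : i < (L.length : Int)) :
    (PySem.List.pyRange 0 quantidade 1).foldl
        (fun soma j => if i + j < (L.length : Int) then soma + PySem.List.pyGetD L (i + j) 0 else soma) 0
      = PySem.List.pyGetD (L.foldl (fun p x => p ++ [PySem.List.pyGetD p (-1) 0 + x]) [0])
            (min (i + quantidade) (L.length : Int)) 0
        - PySem.List.pyGetD (L.foldl (fun p x => p ++ [PySem.List.pyGetD p (-1) 0 + x]) [0]) i 0 := by
  have hpref : (L.foldl (fun p x => p ++ [PySem.List.pyGetD p (-1) 0 + x]) [0]) = 0 :: psums 0 L := by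
    simpa using pref_fold L [] 0
  rw [hpref]
  set n : Int := (L.length : Int) with hn
  set m : Int := min quantidade (n - i) with hm
  have hm0 : 0 < m := by omega
  have hmq : m ≤ quantidade := by omega
  -- LHS
  have lhs_eq :
      (PySem.List.pyRange 0 quantidade 1).foldl
        (fun soma j => if i + j < n then soma + PySem.List.pyGetD L (i + j) 0 else soma) 0
      = ((L.drop i.toNat).take m.toNat).sum := by
    rw [PySem.List.foldl_ite_eq_foldl_filter (fun j => i + j < n)
        (fun soma j => soma + PySem.List.pyGetD L (i + j) 0)]
    have hsplit := PySem.List.pyRange_one_append 0 m quantidade (by omega) (by omega)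
    rw [hsplit, List.filter_append]
    have hfst : (PySem.List.pyRange 0 m 1).filter (fun j => decide (i + j < n))
        = PySem.List.pyRange 0 m 1 := by
      apply List.filter_eq_self.mpr
      intro j hj
      have := (PySem.List.mem_pyRange_one).mp hj
      simp only [decide_eq_true_eq]
      omega
    have hsnd : (PySem.List.pyRange m quantidade 1).filter (fun j => decide (i + j < n)) = [] := by
      apply List.filter_eq_nil_iff.mpr
      intro j hj
      have := (PySem.List.mem_pyRange_one).mp hj
      simp only [decide_eq_true_eq]
      omega
    rw [hfst, hsnd, List.append_nil]
    rw [PySem.List.foldl_add (PySem.List.pyRange 0 m 1) (fun j => PySem.List.pyGetD L (i + j) 0) 0]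
    rw [PySem.List.pyRange_one 0 m, List.map_map]
    have hfun : ((fun j => PySem.List.pyGetD L (i + j) 0) ∘ fun (k : Nat) => (0 : Int) + (k : Int))
        = fun (k : Nat) => PySem.List.pyGetD L ((i.toNat : Int) + (k : Int)) 0 := by
      funext k
      simp only [Function.comp]
      congr 1
      omega
    rw [Int.sub_zero, hfun, zero_add]
    exact seg_sum L i.toNat m.toNat (by omega)
  rw [lhs_eq]
  -- RHS
  have hminiq : min (i + quantidade) n = i + m := by omega
  rw [hminiq]
  have hlen : ((0 : Int) :: psums 0 L).length = L.length + 1 := by simp [psums_length]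
  have hget : ∀ (b : Int), 0 ≤ b → b ≤ n →
      PySem.List.pyGetD ((0 : Int) :: psums 0 L) b 0 = (L.take b.toNat).sum := by
    intro b hb0 hbn
    have hlt : b.toNat < ((0 : Int) :: psums 0 L).length := by rw [hlen]; omega
    rw [PySem.List.pyGetD_eq_getElem _ 0 hb0 (by rw [hlen]; push_cast; omega)]
    rw [← List.getD_eq_getElem _ 0 hlt, psums_get L 0 b.toNat (by omega)]
    ring
  rw [hget (i + m) (by omega) (by omega), hget i (by omega) (by omega)]
  have htn : (i + m).toNat = i.toNat + m.toNat := by omega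
  rw [htn]
  exact (take_diff L i.toNat m.toNat).symm

-- ===== VERDICT (by name: the statement is the Claim_ definition above) =====
theorem agrupar_elementos_spec : Claim_equal_agrupar_elementos := by
  intro quantidade Lista _ hpre
  unfold Spec_agrupar_elementos agrupar_elementos agrupar_elementos_alt
  rcases lt_trichotomy quantidade 0 with hq | hq | hq
  · rw [pyRange_neg_step_nil (Lista.length : Int) quantidade hq (by positivity)]
    simp
  · exact absurd hq hpre
  · rw [PySem.List.foldl_append_singleton_eq_map, PySem.List.foldl_append_singleton_eq_map]
    simp only [List.nil_append]
    apply List.map_congr_left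
    intro i hi
    obtain ⟨h0, h1, -⟩ := (PySem.List.mem_pyRange_iff_of_pos hq i).mp hi
    exact elem_eq quantidade Lista hq i h0 h1
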